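-- pv_equiv track=rewrite | github.com/normalerweise/ansible-truenas | plugins/modules/l3/remote_replication_policy.py | get_most_frequent_tier
-- ===== SOURCE A (Python) =====
-- def get_most_frequent_tier(tiers_dict):
--     """Get the most frequent tier from the tiers dict.
--
--     Args:
--         tiers_dict: Dict mapping tier names to retention counts
--
--     Returns:
--         Name of the most frequent tier
--
--     Raises:
--         ValueError if tiers_dict is empty
--     """
--     if not tiers_dict:
--         raise ValueError("tiers_dict cannot be empty")
--
--     # Define tier order by frequency (most frequent first)
--     tier_order = ["frequent", "hourly", "daily", "weekly", "monthly", "yearly"]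
--
--     # Find the most frequent tier present in tiers_dict
--     for tier in tier_order:
--         if tier in tiers_dict:
--             return tier
--
--     # If none of the standard tiers found, return first key
--     return list(tiers_dict.keys())[0]
-- ===== SOURCE B (Python) =====
-- def get_most_frequent_tier(tiers_dict):
--     if not tiers_dict:
--         raise ValueError("tiers_dict cannot be empty")
--     tier_order = ["frequent", "hourly", "daily", "weekly", "monthly", "yearly"]
--     rank = {t: i for i, t in enumerate(tier_order)}
--     return min(tiers_dict, key=lambda t: rank.get(t, len(tier_order)))
-- ===== Notes on version B (the rewrite author's own statement) =====
-- stated objective: idiomatic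
-- what changed: Instead of scanning the fixed priority list and testing membership in the dict, B precomputes a rank table from the priority list and takes min over the dict's keys by rank (sentinel rank for non-standard keys), which also reproduces the first-key fallback.
import Mathlib
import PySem

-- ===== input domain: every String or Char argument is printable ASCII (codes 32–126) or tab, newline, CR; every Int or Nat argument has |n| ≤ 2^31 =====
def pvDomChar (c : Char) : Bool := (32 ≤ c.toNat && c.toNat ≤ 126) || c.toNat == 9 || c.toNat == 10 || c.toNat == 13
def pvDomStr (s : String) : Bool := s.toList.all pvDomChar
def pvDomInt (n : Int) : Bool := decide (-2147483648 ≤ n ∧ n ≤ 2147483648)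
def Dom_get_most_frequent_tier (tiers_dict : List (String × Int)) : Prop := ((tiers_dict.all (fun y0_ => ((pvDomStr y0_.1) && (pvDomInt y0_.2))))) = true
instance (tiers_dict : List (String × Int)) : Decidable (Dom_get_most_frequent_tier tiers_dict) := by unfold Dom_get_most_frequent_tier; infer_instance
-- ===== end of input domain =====

-- B replaces A's scan of the fixed priority list (with a membership test per tier) by one pass over the
-- dict's keys minimising a precomputed rank; same cost class, more idiomatic.

-- ===== PORT A =====
def tierOrder : List String := ["frequent", "hourly", "daily", "weekly", "monthly", "yearly"]

-- the 'for tier in tier_order: if tier in tiers_dict: return tier' loop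
def tierLoopA (keys : List String) : List String → Option String
  | [] => none
  | t :: rest => if keys.contains t then some t else tierLoopA keys rest

def get_most_frequent_tier (tiers_dict : List (String × Int)) : String :=
  let keys := tiers_dict.map Prod.fst
  match tierLoopA keys tierOrder with
  | some t => t
  | none => keys.headD ""   -- list(tiers_dict.keys())[0]; the empty dict (ValueError) is outside Pre_

-- ===== PORT B =====
-- rank = {t: i for i, t in enumerate(tier_order)}
def rankB : PySem.Dict String Int :=
  (PySem.List.enumerate tierOrder 0).foldl (fun d p => d.insert p.2 p.1) PySem.Dict.empty

def get_most_frequent_tier_alt (tiers_dict : List (String × Int)) : String :=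
  -- min(tiers_dict, key=lambda t: rank.get(t, len(tier_order))); empty dict (ValueError) outside Pre_
  (PySem.List.min? (tiers_dict.map Prod.fst) (fun t => rankB.getD t 6)).getD ""

-- ===== PRECONDITION & SPEC =====
-- Pre_ excludes exactly the empty dict, on which both Pythons raise ValueError.
def Pre_get_most_frequent_tier (tiers_dict : List (String × Int)) : Prop := tiers_dict ≠ []
instance (tiers_dict : List (String × Int)) : Decidable (Pre_get_most_frequent_tier tiers_dict) := by unfold Pre_get_most_frequent_tier; infer_instance
def pvWitness_get_most_frequent_tier : (List (String × Int)) := [("daily", 7), ("xtra", 1)]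

def Spec_get_most_frequent_tier (tiers_dict : List (String × Int)) (out : String) : Prop := out = get_most_frequent_tier_alt tiers_dict
instance (tiers_dict : List (String × Int)) (out : String) : Decidable (Spec_get_most_frequent_tier tiers_dict out) := by unfold Spec_get_most_frequent_tier; infer_instance

-- ===== CLAIM (what is proved, stated in full; the proofs are below) =====
def Claim_equal_get_most_frequent_tier : Prop := ∀ (tiers_dict : List (String × Int)), Dom_get_most_frequent_tier tiers_dict → Pre_get_most_frequent_tier tiers_dict → Spec_get_most_frequent_tier tiers_dict (get_most_frequent_tier tiers_dict)

-- ===== LEMMAS AND PROOFS =====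

-- the key function B minimises, in closed form
theorem rankB_getD (t : String) : rankB.getD t 6 =
    if t = "frequent" then 0 else if t = "hourly" then 1 else if t = "daily" then 2
    else if t = "weekly" then 3 else if t = "monthly" then 4 else if t = "yearly" then 5 else 6 := by
  have h : rankB = ((((((PySem.Dict.empty.insert "frequent" 0).insert "hourly" 1).insert "daily" 2).insert
      "weekly" 3).insert "monthly" 4).insert "yearly" 5) := by rfl
  rw [h]
  by_cases h1 : t = "frequent"
  · subst h1; decide
  by_cases h2 : t = "hourly"
  · subst h2; decide
  by_cases h3 : t = "daily"
  · subst h3; decide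
  by_cases h4 : t = "weekly"
  · subst h4; decide
  by_cases h5 : t = "monthly"
  · subst h5; decide
  by_cases h6 : t = "yearly"
  · subst h6; decide
  simp [PySem.Dict.getD_insert, h1, h2, h3, h4, h5, h6]

-- the step of Python min's running fold, named so the invariant lemmas below can speak about it
def pvStep (key : String → Int) (acc : Option String) (x : String) : Option String :=
  match acc with
  | none => some x
  | some m => if key x < key m then some x else some m

theorem min?_eq_fold (l : List String) (key : String → Int) :
    PySem.List.min? l key = l.foldl (pvStep key) none := by
  simp only [PySem.List.min?]
  exact List.foldl_ext _ _ none (fun acc x _ => by cases acc <;> rfl)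

-- invariant of Python min's fold: a strictly unique minimum wins
theorem minFold_aux (key : String → Int) (m : String) :
    ∀ (l : List String) (c : String), (∀ a ∈ l, a ≠ m → key m < key a) →
    (c = m ∨ (m ∈ l ∧ key m < key c)) →
    l.foldl (pvStep key) (some c) = some m := by
  intro l
  induction l with
  | nil =>
    intro c _ hc
    rcases hc with rfl | ⟨h, _⟩
    · rfl
    · cases h
  | cons x xs ih =>
    intro c hu hc
    simp only [List.foldl_cons, pvStep]
    rcases hc with rfl | ⟨hm, hlt⟩
    · have hx : ¬ key x < key c := by
        by_cases hxm : x = c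
        · subst hxm; omega
        · have := hu x (by simp) hxm; omega
      simp only [hx, if_false]
      exact ih c (fun a ha => hu a (by simp [ha])) (Or.inl rfl)
    · by_cases hxm : x = m
      · subst hxm
        simp only [hlt, if_true]
        exact ih x (fun a ha => hu a (by simp [ha])) (Or.inl rfl)
      · have hmxs : m ∈ xs := by
          rcases List.mem_cons.mp hm with h | h
          · exact absurd h.symm hxm
          · exact h
        have hx : key m < key x := hu x (by simp) hxm
        by_cases hcond : key x < key c
        · simp only [hcond, if_true]
          exact ih x (fun a ha => hu a (by simp [ha])) (Or.inr ⟨hmxs, hx⟩)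
        · simp only [hcond, if_false]
          exact ih c (fun a ha => hu a (by simp [ha])) (Or.inr ⟨hmxs, hlt⟩)

theorem min?_eq_of_unique {l : List String} {key : String → Int} {m : String}
    (hm : m ∈ l) (hu : ∀ a ∈ l, a ≠ m → key m < key a) :
    PySem.List.min? l key = some m := by
  cases l with
  | nil => cases hm
  | cons x xs =>
    rw [min?_eq_fold, List.foldl_cons]
    show xs.foldl (pvStep key) (some x) = some m
    by_cases hxm : x = m
    · subst hxm
      exact minFold_aux key x xs x (fun a ha => hu a (by simp [ha])) (Or.inl rfl)
    · have hmxs : m ∈ xs := by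
        rcases List.mem_cons.mp hm with h | h
        · exact absurd h.symm hxm
        · exact h
      exact minFold_aux key m xs x (fun a ha => hu a (by simp [ha]))
        (Or.inr ⟨hmxs, hu x (by simp) hxm⟩)

-- invariant of Python min's fold on a constant key: the first element wins
theorem minFold_const_aux (key : String → Int) :
    ∀ (l : List String) (c : String), (∀ a ∈ l, key a = key c) →
    l.foldl (pvStep key) (some c) = some c := by
  intro l
  induction l with
  | nil => intro c _; rfl
  | cons x xs ih =>
    intro c h
    have hx : ¬ key x < key c := by rw [h x (by simp)]; omega
    simp only [List.foldl_cons, pvStep, hx, if_false]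
    exact ih c (fun a ha => h a (by simp [ha]))

theorem min?_const {x : String} {xs : List String} {key : String → Int}
    (h : ∀ a ∈ x :: xs, key a = key x) :
    PySem.List.min? (x :: xs) key = some x := by
  rw [min?_eq_fold, List.foldl_cons]
  show xs.foldl (pvStep key) (some x) = some x
  exact minFold_const_aux key xs x (fun a ha => h a (by simp [ha]))

-- ===== VERDICT (by name: the statement is the Claim_ definition above) =====
theorem get_most_frequent_tier_spec : Claim_equal_get_most_frequent_tier := by
  intro l _ hpre
  unfold Spec_get_most_frequent_tier
  obtain ⟨p, rest, rfl⟩ := List.ne_nil_iff_exists_cons.mp hpre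
  set keys := ((p :: rest).map Prod.fst) with hkeys
  have hkeysc : keys = p.1 :: rest.map Prod.fst := by simp [hkeys]
  set key : String → Int := fun t => rankB.getD t 6 with hkey
  -- a helper closing each "present" case
  have main : ∀ (t : String) (i : Int), t ∈ keys → key t = i →
      (∀ a ∈ keys, a ≠ t → i < key a) →
      tierLoopA keys tierOrder = some t →
      get_most_frequent_tier (p :: rest) = get_most_frequent_tier_alt (p :: rest) := by
    intro t i hmem hkt hlt hloop
    have hb : PySem.List.min? keys key = some t := by
      apply min?_eq_of_unique hmem
      intro a ha hat
      rw [hkt]; exact hlt a ha hat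
    simp only [get_most_frequent_tier, get_most_frequent_tier_alt, ← hkeys, ← hkey, hloop, hb,
      Option.getD_some]
  by_cases h1 : "frequent" ∈ keys
  · apply main "frequent" 0 h1 (by rw [hkey]; simp [rankB_getD])
    · intro a ha hne
      rw [hkey]; simp only; rw [rankB_getD]
      split_ifs <;> first | omega | (subst_vars; exact absurd rfl hne)
    · simp [tierLoopA, tierOrder, h1]
  by_cases h2 : "hourly" ∈ keys
  · apply main "hourly" 1 h2 (by rw [hkey]; simp [rankB_getD])
    · intro a ha hne
      rw [hkey]; simp only; rw [rankB_getD]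
      split_ifs <;>
        first | omega | (subst_vars; first | exact absurd ha h1 | exact absurd rfl hne)
    · simp [tierLoopA, tierOrder, h1, h2]
  by_cases h3 : "daily" ∈ keys
  · apply main "daily" 2 h3 (by rw [hkey]; simp [rankB_getD])
    · intro a ha hne
      rw [hkey]; simp only; rw [rankB_getD]
      split_ifs <;>
        first | omega | (subst_vars; first | exact absurd ha h1 | exact absurd ha h2 | exact absurd rfl hne)
    · simp [tierLoopA, tierOrder, h1, h2, h3]
  by_cases h4 : "weekly" ∈ keys
  · apply main "weekly" 3 h4 (by rw [hkey]; simp [rankB_getD])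
    · intro a ha hne
      rw [hkey]; simp only; rw [rankB_getD]
      split_ifs <;>
        first | omega | (subst_vars; first | exact absurd ha h1 | exact absurd ha h2 | exact absurd ha h3 | exact absurd rfl hne)
    · simp [tierLoopA, tierOrder, h1, h2, h3, h4]
  by_cases h5 : "monthly" ∈ keys
  · apply main "monthly" 4 h5 (by rw [hkey]; simp [rankB_getD])
    · intro a ha hne
      rw [hkey]; simp only; rw [rankB_getD]
      split_ifs <;>
        first | omega | (subst_vars; first | exact absurd ha h1 | exact absurd ha h2 | exact absurd ha h3 | exact absurd ha h4 | exact absurd rfl hne)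
    · simp [tierLoopA, tierOrder, h1, h2, h3, h4, h5]
  by_cases h6 : "yearly" ∈ keys
  · apply main "yearly" 5 h6 (by rw [hkey]; simp [rankB_getD])
    · intro a ha hne
      rw [hkey]; simp only; rw [rankB_getD]
      split_ifs <;>
        first | omega | (subst_vars; first | exact absurd ha h1 | exact absurd ha h2 | exact absurd ha h3 | exact absurd ha h4 | exact absurd ha h5 | exact absurd rfl hne)
    · simp [tierLoopA, tierOrder, h1, h2, h3, h4, h5, h6]
  -- no standard tier present: A falls back to the first key, B's key is constantly 6
  have hconst : ∀ a ∈ keys, key a = 6 := by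
    intro a ha
    rw [hkey]; simp only; rw [rankB_getD]
    split_ifs with c1 c2 c3 c4 c5 c6
    · exact absurd (c1 ▸ ha) h1
    · exact absurd (c2 ▸ ha) h2
    · exact absurd (c3 ▸ ha) h3
    · exact absurd (c4 ▸ ha) h4
    · exact absurd (c5 ▸ ha) h5
    · exact absurd (c6 ▸ ha) h6
    · rfl
  have hloop : tierLoopA keys tierOrder = none := by
    simp [tierLoopA, tierOrder, h1, h2, h3, h4, h5, h6]
  have hb : PySem.List.min? keys key = some p.1 := by
    rw [hkeysc]
    apply min?_const
    intro a ha
    rw [hconst a (hkeysc ▸ ha), hconst p.1 (by rw [hkeysc]; exact List.mem_cons_self)]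
  simp only [get_most_frequent_tier, get_most_frequent_tier_alt, List.map_cons, ← hkeysc,
    ← hkey, hloop, hb, Option.getD_some]
  rw [hkeysc]
  rfl
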